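-- pv_equiv track=rewrite | github.com/Yawn-Sean/Daily_CF_Problems | daily_problems/2024/11/1114/personal_submission/cf1580a_liryc.py | solve
-- ===== SOURCE A (Python) =====
-- def solve(n: int, m: int, grid: list[list[int]]):
--         ans = n * m
--         cnt = [0] * m
--         calc = [0] * m
--
--         for i in range(n - 4):
--             for j in range(m):
--                 cnt[j] = 0
--
--             for j in range(i + 1, i + 4):
--                 for k in range(m):
--                     cnt[k] += grid[j][k]
--
--             for j in range(i + 4, n):
--                 for k in range(m):
--                     calc[k] = cnt[k]
--
--                 for k in range(1, m - 1):
--                     calc[k] += 2 - grid[i][k] - grid[j][k]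
--
--                 for k in range(1, m):
--                     calc[k] += calc[k - 1]
--
--                 cur = n * m
--                 for k in range(m - 1, 2, -1):
--                     cur = min(cur, calc[k - 1] + j - i - 1 - cnt[k])
--                     ans = min(ans, cur - calc[k - 3] + j - i - 1 - cnt[k - 3])
--
--                 for k in range(m):
--                     cnt[k] += grid[j][k]
--         return ans
-- ===== SOURCE B (Python) =====
-- def solve(n: int, m: int, grid: list[list[int]]):
--     # One global 2D prefix-sum table + an ascending running minimum over left borders,
--     # instead of A's per-top-row incremental column counters and descending running minimum.
--     ans = n * m
--     if n < 5 or m < 4: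
--         return ans
--     S = [[0] * (m + 1) for _ in range(n + 1)]
--     for x in range(n):
--         row = grid[x]
--         s = 0
--         for y in range(m):
--             s += row[y]
--             S[x + 1][y + 1] = S[x][y + 1] + s
--     for i in range(n - 4):
--         for j in range(i + 4, n):
--             h = j - i - 1
--
--             def col(c):  # ones in column c, rows i+1..j-1
--                 return S[j][c + 1] - S[j][c] - S[i + 1][c + 1] + S[i + 1][c]
--
--             def T(c):  # interior ones + top/bottom zero-fixes, columns 0..c-1
--                 return (S[j][c] - S[i + 1][c]) + 2 * c \
--                     - (S[i + 1][c] - S[i][c]) - (S[j + 1][c] - S[j][c])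
--
--             best = None
--             for r in range(3, m):
--                 l = r - 3
--                 cand = (h - col(l)) - T(l + 1)
--                 best = cand if best is None else min(best, cand)
--                 ans = min(ans, T(r) + (h - col(r)) + best)
--     return ans
-- ===== Notes on version B (the rewrite author's own statement) =====
-- stated objective: alternative
-- what changed: Replaces A's per-top-row incremental column counters, in-place prefix array and descending running minimum over right borders by one global 2D prefix-sum table queried in O(1) per (row-pair, column) plus an ascending running minimum over left borders.
import Mathlib
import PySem

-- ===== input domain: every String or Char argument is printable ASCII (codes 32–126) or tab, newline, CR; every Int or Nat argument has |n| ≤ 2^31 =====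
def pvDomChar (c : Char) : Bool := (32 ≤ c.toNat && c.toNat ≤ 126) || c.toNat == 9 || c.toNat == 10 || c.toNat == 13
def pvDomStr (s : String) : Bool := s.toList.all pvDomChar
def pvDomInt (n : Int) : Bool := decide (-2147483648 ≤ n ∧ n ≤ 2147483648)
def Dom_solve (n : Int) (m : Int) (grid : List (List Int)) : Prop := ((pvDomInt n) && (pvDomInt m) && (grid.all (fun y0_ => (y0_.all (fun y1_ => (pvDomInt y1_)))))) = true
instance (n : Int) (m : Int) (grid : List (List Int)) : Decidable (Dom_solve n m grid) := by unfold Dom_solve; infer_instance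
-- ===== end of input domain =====

-- B replaces A's incremental per-top-row column counters and descending running minimum by one
-- global 2D prefix-sum table plus an ascending running minimum over left borders (alternative, same cost).

-- ===== PORT A =====
def pvG (grid : List (List Int)) (x c : Nat) : Int := (grid.getD x []).getD c 0

-- body of A's loop over the bottom row j (state: the column counters cnt and the running answer)
def pvAstep (n m : Int) (grid : List (List Int)) (i : Nat) (st : List Int × Int) (j : Nat) :
    List Int × Int :=
  let M := m.toNat
  let g := pvG grid
  let cnt := st.1
  let c1 : List Int := (List.range M).map (fun k => cnt.getD k 0)
  let c2 := (List.range' 1 (M - 2)).foldl (fun c k => c.set k (c.getD k 0 + 2 - g i k - g j k)) c1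
  let c3 := (List.range' 1 (M - 1)).foldl (fun c k => c.set k (c.getD k 0 + c.getD (k - 1) 0)) c2
  let inner := ((List.range' 3 (M - 3)).reverse).foldl (fun (p : Int × Int) k =>
      let cur := min p.1 (c3.getD (k - 1) 0 + (j : Int) - i - 1 - cnt.getD k 0)
      (cur, min p.2 (cur - c3.getD (k - 3) 0 + (j : Int) - i - 1 - cnt.getD (k - 3) 0)))
    (n * m, st.2)
  ((List.range M).map (fun k => cnt.getD k 0 + g j k), inner.2)

-- body of A's loop over the top row i
def pvAouter (n m : Int) (grid : List (List Int)) (ans : Int) (i : Nat) : Int :=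
  let M := m.toNat
  let g := pvG grid
  let cnt0 : List Int := (List.range M).map (fun _ => 0)
  let cnt1 := (List.range' (i + 1) 3).foldl
    (fun cnt j => (List.range M).map (fun k => cnt.getD k 0 + g j k)) cnt0
  ((List.range' (i + 4) (n.toNat - (i + 4))).foldl (pvAstep n m grid i) (cnt1, ans)).2

def solve (n : Int) (m : Int) (grid : List (List Int)) : Int :=
  (List.range ((n - 4).toNat)).foldl (pvAouter n m grid) (n * m)

-- ===== PORT B =====
-- one row of the 2D prefix-sum table, built from the previous one with a running row sum
def pvBrow (grid : List (List Int)) (M : Nat) (prev : List Int) (x : Nat) : List Int :=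
  let row := grid.getD x []
  (0 : Int) :: (((List.range M).foldl (fun (q : Int × List Int) y =>
      let s := q.1 + row.getD y 0
      (s, q.2 ++ [prev.getD (y + 1) 0 + s])) ((0 : Int), ([] : List Int))).2)

-- the 2D prefix-sum table S: S[x][y] = sum of grid[a][b] for a < x, b < y
def pvBS (grid : List (List Int)) (N M : Nat) : List (List Int) :=
  let zrow : List Int := (List.range (M + 1)).map (fun _ => 0)
  ((List.range N).foldl (fun (p : List Int × List (List Int)) x =>
    let nr := pvBrow grid M p.1 x
    (nr, p.2 ++ [nr])) (zrow, [zrow])).2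

-- body of B's loop over the bottom row j: ascending sweep of the right border r with a
-- running minimum over left borders
def pvBpair (n m : Int) (S : List (List Int)) (i : Nat) (ans : Int) (j : Nat) : Int :=
  let M := m.toNat
  let h : Int := (j : Int) - i - 1
  let col := fun (c : Nat) =>
    pvG S j (c + 1) - pvG S j c - pvG S (i + 1) (c + 1) + pvG S (i + 1) c
  let T := fun (c : Nat) => (pvG S j c - pvG S (i + 1) c) + 2 * (c : Int)
    - (pvG S (i + 1) c - pvG S i c) - (pvG S (j + 1) c - pvG S j c)
  ((List.range' 3 (M - 3)).foldl (fun (p : Option Int × Int) r =>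
      let l := r - 3
      let cand := (h - col l) - T (l + 1)
      let best := match p.1 with | none => cand | some b => min b cand
      (some best, min p.2 (T r + (h - col r) + best))) (none, ans)).2

def solve_alt (n : Int) (m : Int) (grid : List (List Int)) : Int :=
  let ans := n * m
  if n < 5 ∨ m < 4 then ans else
  let N := n.toNat
  let S := pvBS grid N m.toNat
  (List.range (N - 4)).foldl (fun ans i =>
    (List.range' (i + 4) (N - (i + 4))).foldl (pvBpair n m S i) ans) ans

-- ===== PRECONDITION & SPEC =====
-- Pre_ excludes (a) ill-shaped grids, on which the Python A raises IndexError when a frame could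
-- fit, and (b) grids with a cell outside {0,1} in the n×m window when a frame could fit: cells are
-- 0/1 in the problem's domain, and on other integers A's internal n*m running-minimum clamp leaks
-- arithmetic artefacts no specification covers (see cites in claim.json).
def Pre_solve (n : Int) (m : Int) (grid : List (List Int)) : Prop :=
  5 ≤ n → 1 ≤ m →
    (n ≤ (grid.length : Int) ∧
     (∀ row ∈ grid.take n.toNat, m ≤ (row.length : Int)) ∧
     (4 ≤ m → ∀ row ∈ grid.take n.toNat, ∀ v ∈ row.take m.toNat, v = 0 ∨ v = 1))
instance (n : Int) (m : Int) (grid : List (List Int)) : Decidable (Pre_solve n m grid) := by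
  unfold Pre_solve; infer_instance

def pvWitness_solve : Int × Int × List (List Int) :=
  (5, 4, [[1,1,1,1],[1,0,0,1],[1,0,0,1],[1,0,0,1],[1,1,1,1]])

def Spec_solve (n : Int) (m : Int) (grid : List (List Int)) (out : Int) : Prop :=
  out = solve_alt n m grid
instance (n : Int) (m : Int) (grid : List (List Int)) (out : Int) : Decidable (Spec_solve n m grid out) := by
  unfold Spec_solve; infer_instance

-- ===== CLAIM (what is proved, stated in full; the proofs are below) =====
def Claim_equal_solve : Prop := ∀ (n : Int) (m : Int) (grid : List (List Int)),
  Dom_solve n m grid → Pre_solve n m grid → Spec_solve n m grid (solve n m grid)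

-- ===== LEMMAS AND PROOFS =====

/-! Common abstract description: for a top row i and bottom row j, the cost of the frame with
left column l and right column r decomposes into column sums over the interior rows; both
programs are shown to compute the fold of `min` over the same list of frame costs. -/

-- column sum: column c, rows a .. a+t-1
def pvCS (grid : List (List Int)) (c a t : Nat) : Int :=
  ((List.range' a t).map (fun x => pvG grid x c)).sum
-- row prefix: row x, columns < c
def pvRP (grid : List (List Int)) (x c : Nat) : Int :=
  ((List.range c).map (fun y => pvG grid x y)).sum
-- column prefix: column c, rows < x
def pvCP (grid : List (List Int)) (c x : Nat) : Int :=
  ((List.range x).map (fun a => pvG grid a c)).sum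
-- rectangle sum: rows < x, columns < y
def pvRect (grid : List (List Int)) (x y : Nat) : Int :=
  ((List.range x).map (fun a => pvRP grid a y)).sum
-- the value A's calc array holds at index t before prefix summation
def pvC2 (grid : List (List Int)) (M i j t : Nat) : Int :=
  pvCS grid t (i + 1) (j - (i + 1)) +
    (if 1 ≤ t ∧ t + 1 < M then 2 - pvG grid i t - pvG grid j t else 0)
def pvP (grid : List (List Int)) (M i j k : Nat) : Int :=
  ((List.range (k + 1)).map (pvC2 grid M i j)).sum
def pvF (grid : List (List Int)) (M i j r : Nat) : Int :=
  pvP grid M i j (r - 1) + ((j : Int) - i - 1) - pvCS grid r (i + 1) (j - (i + 1))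
def pvGl (grid : List (List Int)) (M i j l : Nat) : Int :=
  ((j : Int) - i - 1) - pvCS grid l (i + 1) (j - (i + 1)) - pvP grid M i j l
def pvCosts (grid : List (List Int)) (M i j : Nat) : List Int :=
  (List.range' 3 (M - 3)).flatMap
    (fun r => (List.range (r - 2)).map (fun l => pvF grid M i j r + pvGl grid M i j l))
def pvInner (grid : List (List Int)) (M i j : Nat) (a0 : Int) : Int :=
  (pvCosts grid M i j).foldl min a0
def pvSpec (n m : Int) (grid : List (List Int)) : Int :=
  (List.range ((n - 4).toNat)).foldl (fun ans i =>
    (List.range' (i + 4) (n.toNat - (i + 4))).foldl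
      (fun a j => pvInner grid m.toNat i j a) ans) (n * m)

-- hypotheses the A-side clamp argument needs
structure pvH (n m : Int) (grid : List (List Int)) : Prop where
  hn : 5 ≤ n
  hm : 4 ≤ m
  h01 : ∀ x, x < n.toNat → ∀ c, c < m.toNat → pvG grid x c = 0 ∨ pvG grid x c = 1

-- ---- generic fold-min facts ----
lemma pv_le_fmin {xs : List Int} {a c : Int} (h1 : c ≤ a) (h2 : ∀ x ∈ xs, c ≤ x) :
    c ≤ xs.foldl min a := by
  induction xs generalizing a with
  | nil => simpa using h1
  | cons x t ih =>
    exact ih (le_min h1 (h2 x (by simp))) (fun y hy => h2 y (by simp [hy]))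

lemma pv_fmin_init_min (xs : List Int) (a b : Int) :
    xs.foldl min (min a b) = min (xs.foldl min a) b := by
  induction xs generalizing a with
  | nil => rfl
  | cons x t ih =>
    simp only [List.foldl_cons]
    rw [show min (min a b) x = min (min a x) b by
      rw [min_assoc, min_comm b x, ← min_assoc], ih]

lemma pv_flatMap_congr {α β : Type} {l : List α} {f g : α → List β}
    (h : ∀ x ∈ l, f x = g x) : l.flatMap f = l.flatMap g := by
  induction l with
  | nil => rfl
  | cons x t ih =>
    rw [List.flatMap_cons, List.flatMap_cons, h x (by simp), ih (fun y hy => h y (by simp [hy]))]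

-- ---- getD facts ----
lemma pv_getD_map_range {α : Type} (f : Nat → α) (d : α) (M k : Nat) :
    ((List.range M).map f).getD k d = if k < M then f k else d := by
  by_cases h : k < M
  · rw [if_pos h]
    rw [List.getD_eq_getElem?_getD]
    simp [List.getElem?_map, List.getElem?_range h]
  · rw [if_neg h]
    rw [List.getD_eq_getElem?_getD, List.getElem?_eq_none (by simpa using le_of_not_gt h)]
    rfl

lemma pv_getD_set (c : List Int) (k : Nat) (v : Int) (q : Nat) :
    (c.set k v).getD q 0 = if q = k ∧ k < c.length then v else c.getD q 0 := by
  rw [List.getD_eq_getElem?_getD, List.getD_eq_getElem?_getD, List.getElem?_set]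
  by_cases hk : k = q
  · subst hk
    by_cases hl : k < c.length
    · simp [hl]
    · simp [hl, List.getElem?_eq_none (le_of_not_gt hl)]
  · rw [if_neg hk, if_neg (fun h => hk h.1.symm)]

lemma pv_foldset_length (l : List Nat) (F : Nat → List Int → Int) (c : List Int) :
    (l.foldl (fun d k => d.set k (F k d)) c).length = c.length := by
  induction l generalizing c with
  | nil => rfl
  | cons x t ih => rw [List.foldl_cons, ih, List.length_set]

lemma pv_setfold_getD (f : Nat → Int → Int) :
    ∀ (t s : Nat) (c : List Int), s + t ≤ c.length → ∀ (q : Nat),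
      ((List.range' s t).foldl (fun d k => d.set k (f k (d.getD k 0))) c).getD q 0
        = if s ≤ q ∧ q < s + t then f q (c.getD q 0) else c.getD q 0 := by
  intro t
  induction t with
  | zero =>
    intro s c h q
    simp only [List.range'_zero, List.foldl_nil]
    rw [if_neg (by omega)]
  | succ t ih =>
    intro s c h q
    rw [List.range'_succ, List.foldl_cons]
    have hs : s < c.length := by omega
    rw [ih (s + 1) _ (by rw [List.length_set]; omega) q, pv_getD_set]
    by_cases hq : q = s
    · subst hq
      split_ifs <;> first | rfl | omega
    · split_ifs <;> first | rfl | omega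

def pvPS (c : List Int) (q : Nat) : Int := ((List.range (q + 1)).map (fun t => c.getD t 0)).sum

lemma pvPS_succ (c : List Int) (q : Nat) : pvPS c (q + 1) = pvPS c q + c.getD (q + 1) 0 := by
  simp [pvPS, List.range_succ]; ring

lemma pv_prefixfold_getD :
    ∀ (p : Nat) (c : List Int), p < c.length → ∀ q, q < c.length →
      ((List.range' 1 p).foldl (fun d k => d.set k (d.getD k 0 + d.getD (k - 1) 0)) c).getD q 0
        = if q ≤ p then pvPS c q else c.getD q 0 := by
  intro p
  induction p with
  | zero =>
    intro c hp q hq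
    simp only [List.range'_zero, List.foldl_nil]
    by_cases h0 : q = 0
    · subst h0
      rw [if_pos (le_refl 0)]
      simp [pvPS]
    · rw [if_neg (by omega)]
  | succ p ih =>
    intro c hp q hq
    have hp' : p < c.length := by omega
    have hstep : List.range' 1 (p + 1) = List.range' 1 p ++ [p + 1] := by
      rw [List.range'_concat]; simp [Nat.add_comm]
    rw [hstep, List.foldl_append, List.foldl_cons, List.foldl_nil]
    have hlen : ((List.range' 1 p).foldl
        (fun d k => d.set k (d.getD k 0 + d.getD (k - 1) 0)) c).length = c.length :=
      pv_foldset_length _ (fun k d => d.getD k 0 + d.getD (k - 1) 0) c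
    rw [pv_getD_set]
    have e1 : ((List.range' 1 p).foldl
        (fun d k => d.set k (d.getD k 0 + d.getD (k - 1) 0)) c).getD (p + 1) 0
        = c.getD (p + 1) 0 := by
      rw [ih c hp' (p + 1) (by omega), if_neg (by omega)]
    have e2 : ((List.range' 1 p).foldl
        (fun d k => d.set k (d.getD k 0 + d.getD (k - 1) 0)) c).getD (p + 1 - 1) 0
        = pvPS c p := by
      rw [show p + 1 - 1 = p from rfl, ih c hp' p (by omega), if_pos (le_refl p)]
    by_cases hq1 : q = p + 1
    · subst hq1
      rw [if_pos ⟨rfl, by rw [hlen]; omega⟩, e1, e2, if_pos (le_refl _), pvPS_succ]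
      ring
    · rw [if_neg (fun hh => hq1 hh.1), ih c hp' q hq]
      split_ifs <;> first | rfl | omega

-- ---- column-sum splitting ----
lemma pvCS_zero (grid : List (List Int)) (c a : Nat) : pvCS grid c a 0 = 0 := by simp [pvCS]

lemma pvCS_cons (grid : List (List Int)) (c a t : Nat) :
    pvCS grid c a (t + 1) = pvG grid a c + pvCS grid c (a + 1) t := by
  simp [pvCS, List.range'_succ]

lemma pvCS_concat (grid : List (List Int)) (c a t : Nat) :
    pvCS grid c a (t + 1) = pvCS grid c a t + pvG grid (a + t) c := by
  simp [pvCS, List.range'_concat]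

lemma pv_addrows (grid : List (List Int)) (M : Nat) :
    ∀ (t a : Nat) (cnt : List Int), cnt.length = M →
      (((List.range' a t).foldl
          (fun cnt j => (List.range M).map (fun k => cnt.getD k 0 + pvG grid j k)) cnt)).length = M
      ∧ ∀ k, k < M →
        ((List.range' a t).foldl
          (fun cnt j => (List.range M).map (fun k => cnt.getD k 0 + pvG grid j k)) cnt).getD k 0
          = cnt.getD k 0 + pvCS grid k a t := by
  intro t
  induction t with
  | zero =>
    intro a cnt h
    refine ⟨h, fun k hk => ?_⟩
    simp [pvCS_zero]
  | succ t ih =>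
    intro a cnt h
    rw [List.range'_succ]
    simp only [List.foldl_cons]
    obtain ⟨hl, hv⟩ := ih (a + 1) ((List.range M).map (fun k => cnt.getD k 0 + pvG grid a k)) (by simp)
    refine ⟨hl, fun k hk => ?_⟩
    rw [hv k hk, pv_getD_map_range, if_pos hk, pvCS_cons]
    ring

lemma pv_gfold_init_min (g : Nat → Int) (L : List Nat) (a X : Int) :
    L.foldl (fun a k => min a (g k)) (min a X) = min (L.foldl (fun a k => min a (g k)) a) X := by
  rw [← List.foldl_map (f := g) (g := min), ← List.foldl_map (f := g) (g := min),
    pv_fmin_init_min]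

-- ---- the two running-minimum loops both compute the fold of min over the frame costs ----
def pvSuf (F : Nat → Int) (c0 : Int) (t k : Nat) : Int :=
  ((List.range' k (3 + t - k)).map F).foldl min c0

lemma pv_descfold (F G : Nat → Int) : ∀ (t : Nat) (c0 a0 : Int),
    (((List.range' 3 t).reverse).foldl (fun (p : Int × Int) k =>
        (min p.1 (F k), min p.2 (min p.1 (F k) + G k))) (c0, a0))
      = (((List.range' 3 t).map F).foldl min c0,
         (List.range' 3 t).foldl (fun a k => min a (pvSuf F c0 t k + G k)) a0) := by
  intro t
  induction t with
  | zero => intro c0 a0; simp [pvSuf]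
  | succ t ih =>
    intro c0 a0
    have hconc : List.range' 3 (t + 1) = List.range' 3 t ++ [3 + t] := by
      rw [List.range'_concat]; simp
    rw [hconc, List.reverse_append, List.reverse_singleton, List.singleton_append,
      List.foldl_cons, ih (min c0 (F (3 + t))) (min a0 (min c0 (F (3 + t)) + G (3 + t)))]
    have hsuf : ∀ k, k ≤ 3 + t →
        pvSuf F c0 (t + 1) k = pvSuf F (min c0 (F (3 + t))) t k := by
      intro k hk
      unfold pvSuf
      have hsplit : List.range' k (3 + (t + 1) - k) = List.range' k (3 + t - k) ++ [3 + t] := by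
        rw [show 3 + (t + 1) - k = (3 + t - k) + 1 from by omega, List.range'_concat]
        simp [show k + (3 + t - k) = 3 + t from by omega]
      rw [hsplit, List.map_append, List.foldl_append]
      simp only [List.map_cons, List.map_nil, List.foldl_cons, List.foldl_nil]
      rw [pv_fmin_init_min]
    have hsufLast : pvSuf F c0 (t + 1) (3 + t) = min c0 (F (3 + t)) := by
      unfold pvSuf
      rw [show 3 + (t + 1) - (3 + t) = 1 from by omega]
      simp [List.range'_one]
    simp only [Prod.mk.injEq]
    constructor
    · rw [List.map_append, List.foldl_append]
      simp only [List.map_cons, List.map_nil, List.foldl_cons, List.foldl_nil]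
      rw [pv_fmin_init_min]
    · rw [List.foldl_append, List.foldl_cons, List.foldl_nil]
      rw [PySem.List.foldl_congr_mem (List.range' 3 t)
        (fun a k => min a (pvSuf F (min c0 (F (3 + t))) t k + G k))
        (fun a k => min a (pvSuf F c0 (t + 1) k + G k))
        (min a0 (min c0 (F (3 + t)) + G (3 + t)))
        (fun acc k hk => by
          show min acc (pvSuf F (min c0 (F (3 + t))) t k + G k)
              = min acc (pvSuf F c0 (t + 1) k + G k)
          rw [hsuf k (by rw [List.mem_range'_1] at hk; omega)])]
      rw [← hsufLast, pv_gfold_init_min (fun k => pvSuf F c0 (t + 1) k + G k)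
        (List.range' 3 t) a0 (pvSuf F c0 (t + 1) (3 + t) + G (3 + t))]

lemma pv_descfold_eq_min (F G : Nat → Int) (t : Nat) (c0 a0 : Int) (ht : 1 ≤ t)
    (hb : F (t + 2) < c0) :
    (((List.range' 3 t).reverse).foldl (fun (p : Int × Int) k =>
        (min p.1 (F k), min p.2 (min p.1 (F k) + G k))) (c0, a0)).2
      = ((List.range' 3 t).flatMap
          (fun r => (List.range (r - 2)).map (fun l => F r + G (l + 3)))).foldl min a0 := by
  rw [pv_descfold]
  rw [← List.foldl_map (f := fun k => pvSuf F c0 t k + G k) (g := min)]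
  apply le_antisymm
  · apply pv_le_fmin (PySem.List.foldl_min_le _ _).1
    intro x hx
    simp only [List.mem_flatMap, List.mem_map, List.mem_range] at hx
    obtain ⟨r, hr, l, hl, rfl⟩ := hx
    rw [List.mem_range'_1] at hr
    have h1 : ((List.range' 3 t).map (fun k => pvSuf F c0 t k + G k)).foldl min a0
        ≤ pvSuf F c0 t (l + 3) + G (l + 3) :=
      (PySem.List.foldl_min_le _ _).2 _
        (List.mem_map_of_mem (by rw [List.mem_range'_1]; omega))
    have h2 : pvSuf F c0 t (l + 3) ≤ F r :=
      (PySem.List.foldl_min_le _ _).2 _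
        (List.mem_map_of_mem (by rw [List.mem_range'_1]; omega))
    omega
  · rcases PySem.List.foldl_min_mem
      ((List.range' 3 t).map (fun k => pvSuf F c0 t k + G k)) a0 with hc | hc
    · rw [hc]
      exact (PySem.List.foldl_min_le _ _).1
    · obtain ⟨k, hk, hv⟩ := List.mem_map.mp hc
      rw [← hv]
      rw [List.mem_range'_1] at hk
      have hsle : pvSuf F c0 t k ≤ F (t + 2) :=
        (PySem.List.foldl_min_le _ _).2 _
          (List.mem_map_of_mem (by rw [List.mem_range'_1]; omega))
      rcases PySem.List.foldl_min_mem ((List.range' k (3 + t - k)).map F) c0 with hs | hs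
    -- pvSuf is definitionally this fold
      · exfalso
        have : pvSuf F c0 t k = c0 := hs
        omega
      · obtain ⟨r, hr, hFr⟩ := List.mem_map.mp hs
        rw [List.mem_range'_1] at hr
        have hmem : F r + G k ∈ (List.range' 3 t).flatMap
            (fun r => (List.range (r - 2)).map (fun l => F r + G (l + 3))) := by
          rw [List.mem_flatMap]
          refine ⟨r, by rw [List.mem_range'_1]; omega, ?_⟩
          rw [List.mem_map]
          exact ⟨k - 3, by rw [List.mem_range]; omega, by rw [show k - 3 + 3 = k from by omega]⟩
        have hle := (PySem.List.foldl_min_le ((List.range' 3 t).flatMap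
            (fun r => (List.range (r - 2)).map (fun l => F r + G (l + 3)))) a0).2 _ hmem
        have hPS : pvSuf F c0 t k = F r := hFr.symm
        omega

def pvBmin (G : Nat → Int) (s : Nat) : Int := ((List.range s).map G).foldl min (G 0)

lemma pv_ascfold (F G : Nat → Int) : ∀ (t : Nat) (a0 : Int),
    ((List.range' 3 t).foldl (fun (p : Option Int × Int) r =>
        (some (match p.1 with | none => G (r - 3) | some b => min b (G (r - 3))),
         min p.2 (F r + (match p.1 with | none => G (r - 3) | some b => min b (G (r - 3))))))
      (none, a0))
      = (if t = 0 then (none : Option Int) else some (pvBmin G t),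
         (List.range' 3 t).foldl (fun a r => min a (F r + pvBmin G (r - 2))) a0) := by
  intro t a0
  induction t with
  | zero => simp
  | succ t ih =>
    have hconc : List.range' 3 (t + 1) = List.range' 3 t ++ [3 + t] := by
      rw [List.range'_concat]; simp
    rw [hconc, List.foldl_append, List.foldl_append, List.foldl_cons, List.foldl_nil,
      List.foldl_cons, List.foldl_nil, ih]
    have hb1 : pvBmin G 1 = G 0 := by simp [pvBmin]
    have hbs : ∀ u, pvBmin G (u + 1) = min (pvBmin G u) (G u) := by
      intro u
      unfold pvBmin
      rw [List.range_succ, List.map_append, List.foldl_append]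
      simp
    simp only [Prod.mk.injEq]
    cases t with
    | zero =>
      refine ⟨by simp [hb1], ?_⟩
      simp [hb1]
    | succ u =>
      have ht0 : ¬ (u + 1 = 0) := by omega
      rw [if_neg ht0, if_neg (by omega)]
      refine ⟨?_, ?_⟩
      · simp only []
        rw [show 3 + (u + 1) - 3 = u + 1 from by omega, ← hbs (u + 1)]
      · simp only []
        rw [show 3 + (u + 1) - 3 = u + 1 from by omega, ← hbs (u + 1),
          show 3 + (u + 1) - 2 = u + 2 from by omega]

lemma pv_ascfold_eq_min (F G : Nat → Int) (t : Nat) (a0 : Int) :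
    ((List.range' 3 t).foldl (fun (p : Option Int × Int) r =>
        (some (match p.1 with | none => G (r - 3) | some b => min b (G (r - 3))),
         min p.2 (F r + (match p.1 with | none => G (r - 3) | some b => min b (G (r - 3))))))
      ((none : Option Int), a0)).2
      = ((List.range' 3 t).flatMap
          (fun r => (List.range (r - 2)).map (fun l => F r + G l))).foldl min a0 := by
  rw [pv_ascfold]
  simp only []
  rw [← List.foldl_map (f := fun r => F r + pvBmin G (r - 2)) (g := min)]
  apply le_antisymm
  · apply pv_le_fmin (PySem.List.foldl_min_le _ _).1
    intro x hx
    simp only [List.mem_flatMap, List.mem_map, List.mem_range] at hx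
    obtain ⟨r, hr, l, hl, rfl⟩ := hx
    rw [List.mem_range'_1] at hr
    have h1 : ((List.range' 3 t).map (fun r => F r + pvBmin G (r - 2))).foldl min a0
        ≤ F r + pvBmin G (r - 2) :=
      (PySem.List.foldl_min_le _ _).2 _
        (List.mem_map_of_mem (by rw [List.mem_range'_1]; omega))
    have h2 : pvBmin G (r - 2) ≤ G l :=
      (PySem.List.foldl_min_le _ _).2 _ (List.mem_map_of_mem (by rw [List.mem_range]; omega))
    omega
  · rcases PySem.List.foldl_min_mem
      ((List.range' 3 t).map (fun r => F r + pvBmin G (r - 2))) a0 with hc | hc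
    · rw [hc]
      exact (PySem.List.foldl_min_le _ _).1
    · obtain ⟨r, hr, hv⟩ := List.mem_map.mp hc
      rw [← hv]
      rw [List.mem_range'_1] at hr
      have hflat : ∀ l, l < r - 2 → ((List.range' 3 t).flatMap
          (fun r => (List.range (r - 2)).map (fun l => F r + G l))).foldl min a0 ≤ F r + G l := by
        intro l hl
        apply (PySem.List.foldl_min_le _ _).2
        rw [List.mem_flatMap]
        refine ⟨r, by rw [List.mem_range'_1]; omega, ?_⟩
        rw [List.mem_map]
        exact ⟨l, by rw [List.mem_range]; omega, rfl⟩
      rcases PySem.List.foldl_min_mem ((List.range (r - 2)).map G) (G 0) with hs | hs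
      · have : pvBmin G (r - 2) = G 0 := hs
        have h0 := hflat 0 (by omega)
        omega
      · obtain ⟨l, hl, hGl⟩ := List.mem_map.mp hs
        rw [List.mem_range] at hl
        have hPB : pvBmin G (r - 2) = G l := hGl.symm
        have h0 := hflat l hl
        omega

-- ---- A side ----
lemma pv_sum01 {f : Nat → Int} : ∀ {l : List Nat}, (∀ x ∈ l, f x = 0 ∨ f x = 1) →
    0 ≤ (l.map f).sum ∧ (l.map f).sum ≤ (l.length : Int) := by
  intro l
  induction l with
  | nil => intro _; simp
  | cons x t ih =>
    intro h
    have hx := h x (by simp)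
    have ht := ih (fun y hy => h y (by simp [hy]))
    simp only [List.map_cons, List.sum_cons, List.length_cons]
    push_cast
    omega

lemma pv_F_bound (n m : Int) (grid : List (List Int)) (H : pvH n m grid) (i j : Nat)
    (hij : i + 4 ≤ j) (hj : j < n.toNat) :
    pvF grid m.toNat i j (m.toNat - 1) < n * m := by
  obtain ⟨hn, hm, h01⟩ := H
  have hm4 : 4 ≤ m.toNat := by omega
  have hn5 : 5 ≤ n.toNat := by omega
  have hcs : ∀ c, c < m.toNat → 0 ≤ pvCS grid c (i + 1) (j - (i + 1)) ∧
      pvCS grid c (i + 1) (j - (i + 1)) ≤ ((j - (i + 1) : Nat) : Int) := by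
    intro c hc
    have h := pv_sum01 (f := fun x => pvG grid x c) (l := List.range' (i + 1) (j - (i + 1)))
      (fun x hx => by
        rw [List.mem_range'_1] at hx
        exact h01 x (by omega) c hc)
    simpa [pvCS, List.length_range'] using h
  have hg : ∀ x, x < n.toNat → ∀ c, c < m.toNat → 0 ≤ pvG grid x c := by
    intro x hx c hc
    rcases h01 x hx c hc with h | h <;> omega
  set M := m.toNat with hM
  set d : Int := (j : Int) - i - 1 with hd
  have hdech : ((j - (i + 1) : Nat) : Int) = d := by omega
  have hc2 : ∀ t' ∈ List.range (M - 1), pvC2 grid M i j t' ≤ d + 2 := by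
    intro t' ht'
    rw [List.mem_range] at ht'
    unfold pvC2
    have h1 := (hcs t' (by omega)).2
    rw [hdech] at h1
    split_ifs with hgd
    · have hgi := hg i (by omega) t' (by omega)
      have hgj := hg j (by omega) t' (by omega)
      omega
    · omega
  have hsum : pvP grid M i j (M - 2) ≤ ((M - 1 : Nat) : Int) * (d + 2) := by
    unfold pvP
    rw [show M - 2 + 1 = M - 1 from by omega]
    calc ((List.range (M - 1)).map (pvC2 grid M i j)).sum
        ≤ ((List.range (M - 1)).map (fun _ => d + 2)).sum := List.sum_le_sum hc2
      _ = ((M - 1 : Nat) : Int) * (d + 2) := by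
          rw [PySem.List.sum_map_const_int]
          simp
  have hcs0 := (hcs (M - 1) (by omega)).1
  have hM1 : ((M - 1 : Nat) : Int) = ((M : Nat) : Int) - 1 := by omega
  rw [hM1] at hsum
  have hnn : ((n.toNat : Nat) : Int) = n := Int.toNat_of_nonneg (by omega)
  have hmm : ((M : Nat) : Int) = m := by rw [hM]; exact Int.toNat_of_nonneg (by omega)
  have hd2 : d ≤ ((n.toNat : Nat) : Int) - 2 := by omega
  have hd3 : 3 ≤ d := by omega
  have hm4' : (4 : Int) ≤ ((M : Nat) : Int) := by omega
  have hn5' : (5 : Int) ≤ ((n.toNat : Nat) : Int) := by omega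
  have key : (((M : Nat) : Int) - 1) * (d + 2) + d < ((n.toNat : Nat) : Int) * ((M : Nat) : Int) := by
    nlinarith [mul_le_mul_of_nonneg_left hd2 (show (0 : Int) ≤ ((M : Nat) : Int) by omega)]
  have hprod : ((n.toNat : Nat) : Int) * ((M : Nat) : Int) = n * m := by rw [hnn, hmm]
  unfold pvF
  rw [show M - 1 - 1 = M - 2 from by omega]
  have hgoal : pvP grid M i j (M - 2) + ((j : Int) - ↑i - 1)
      - pvCS grid (M - 1) (i + 1) (j - (i + 1)) < n * m := by
    rw [← hprod]
    have : (j : Int) - ↑i - 1 = d := by rw [hd]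
    rw [this]
    linarith [hsum, hcs0, key]
  exact hgoal

lemma pv_astep (n m : Int) (grid : List (List Int)) (H : pvH n m grid) (i j : Nat)
    (hij : i + 4 ≤ j) (hj : j < n.toNat)
    (cnt : List Int) (a : Int) (hlen : cnt.length = m.toNat)
    (hcnt : ∀ k, k < m.toNat → cnt.getD k 0 = pvCS grid k (i + 1) (j - (i + 1))) :
    pvAstep n m grid i (cnt, a) j
      = ((List.range m.toNat).map (fun k => cnt.getD k 0 + pvG grid j k),
         pvInner grid m.toNat i j a) := by
  have hm4 : 4 ≤ m.toNat := by have := H.hm; omega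
  simp only [pvAstep]
  simp only [Prod.mk.injEq]
  refine ⟨by trivial, ?_⟩
  set M := m.toNat with hM
  set c1 : List Int := (List.range M).map (fun k => cnt.getD k 0) with hc1
  set c2 : List Int := (List.range' 1 (M - 2)).foldl
    (fun c k => c.set k (c.getD k 0 + 2 - pvG grid i k - pvG grid j k)) c1 with hc2
  set c3 : List Int := (List.range' 1 (M - 1)).foldl
    (fun c k => c.set k (c.getD k 0 + c.getD (k - 1) 0)) c2 with hc3
  have hc1len : c1.length = M := by simp [hc1]
  have hc1v : ∀ q, q < M → c1.getD q 0 = cnt.getD q 0 := by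
    intro q hq
    rw [hc1, pv_getD_map_range, if_pos hq]
  have hc2len : c2.length = M := by
    rw [hc2, pv_foldset_length (List.range' 1 (M - 2))
      (fun k d => d.getD k 0 + 2 - pvG grid i k - pvG grid j k) c1, hc1len]
  have hc2v : ∀ q, q < M → c2.getD q 0 = pvC2 grid M i j q := by
    intro q hq
    rw [hc2, pv_setfold_getD (fun k v => v + 2 - pvG grid i k - pvG grid j k) (M - 2) 1 c1
      (by rw [hc1len]; omega) q]
    unfold pvC2
    by_cases hgd : 1 ≤ q ∧ q < 1 + (M - 2)
    · rw [if_pos hgd, if_pos (by omega), hc1v q hq, hcnt q hq]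
      ring
    · rw [if_neg hgd, if_neg (by omega), hc1v q hq, hcnt q hq]
      ring
  have hc3v : ∀ q, q < M → c3.getD q 0 = pvP grid M i j q := by
    intro q hq
    rw [hc3, pv_prefixfold_getD (M - 1) c2 (by omega) q (by omega), if_pos (by omega)]
    unfold pvPS pvP
    congr 1
    apply List.map_congr_left
    intro t ht
    rw [List.mem_range] at ht
    exact hc2v t (by omega)
  have hcong : ((List.range' 3 (M - 3)).reverse).foldl (fun (p : Int × Int) k =>
        (min p.1 (c3.getD (k - 1) 0 + (j : Int) - ↑i - 1 - cnt.getD k 0),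
         min p.2 (min p.1 (c3.getD (k - 1) 0 + (j : Int) - ↑i - 1 - cnt.getD k 0)
           - c3.getD (k - 3) 0 + (j : Int) - ↑i - 1 - cnt.getD (k - 3) 0))) (n * m, a)
      = ((List.range' 3 (M - 3)).reverse).foldl (fun (p : Int × Int) k =>
        (min p.1 (pvF grid M i j k),
         min p.2 (min p.1 (pvF grid M i j k) + pvGl grid M i j (k - 3)))) (n * m, a) := by
    apply PySem.List.foldl_congr_mem
    intro p k hk
    rw [List.mem_reverse, List.mem_range'_1] at hk
    have e1 : c3.getD (k - 1) 0 + (j : Int) - ↑i - 1 - cnt.getD k 0 = pvF grid M i j k := by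
      rw [hc3v (k - 1) (by omega), hcnt k (by omega)]
      unfold pvF
      ring
    have e2 : ∀ cur : Int, cur - c3.getD (k - 3) 0 + (j : Int) - ↑i - 1 - cnt.getD (k - 3) 0
        = cur + pvGl grid M i j (k - 3) := by
      intro cur
      rw [hc3v (k - 3) (by omega), hcnt (k - 3) (by omega)]
      unfold pvGl
      ring
    rw [e1]
    simp only [Prod.mk.injEq]
    exact ⟨by trivial, by rw [e2]⟩
  rw [hcong, pv_descfold_eq_min (pvF grid M i j) (fun k => pvGl grid M i j (k - 3)) (M - 3)
    (n * m) a (by omega) (by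
      rw [show M - 3 + 2 = M - 1 from by omega]
      exact pv_F_bound n m grid H i j hij hj)]
  unfold pvInner pvCosts
  simp only [Nat.add_sub_cancel]

lemma pv_jfold (n m : Int) (grid : List (List Int)) (H : pvH n m grid) (i : Nat) :
    ∀ (t s : Nat) (cnt : List Int) (a : Int), i + 4 ≤ s → s + t ≤ n.toNat →
      cnt.length = m.toNat →
      (∀ k, k < m.toNat → cnt.getD k 0 = pvCS grid k (i + 1) (s - (i + 1))) →
      ((List.range' s t).foldl (pvAstep n m grid i) (cnt, a)).2
        = (List.range' s t).foldl (fun a j => pvInner grid m.toNat i j a) a := by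
  intro t
  induction t with
  | zero => intro s cnt a _ _ _ _; simp
  | succ t ih =>
    intro s cnt a hs hsn hlen hcnt
    rw [List.range'_succ]
    simp only [List.foldl_cons]
    rw [pv_astep n m grid H i s (by omega) (by omega) cnt a hlen hcnt]
    have hlen' : ((List.range m.toNat).map (fun k => cnt.getD k 0 + pvG grid s k)).length
        = m.toNat := by simp
    have hchar' : ∀ k, k < m.toNat →
        ((List.range m.toNat).map (fun k => cnt.getD k 0 + pvG grid s k)).getD k 0
          = pvCS grid k (i + 1) (s + 1 - (i + 1)) := by
      intro k hk
      rw [pv_getD_map_range, if_pos hk, hcnt k hk,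
        show s + 1 - (i + 1) = (s - (i + 1)) + 1 from by omega, pvCS_concat,
        show i + 1 + (s - (i + 1)) = s from by omega]
    exact ih (s + 1) _ _ (by omega) (by omega) hlen' hchar'

lemma pv_aouter (n m : Int) (grid : List (List Int)) (H : pvH n m grid) (i : Nat)
    (hi : i < (n - 4).toNat) (a : Int) :
    pvAouter n m grid a i
      = (List.range' (i + 4) (n.toNat - (i + 4))).foldl
          (fun a j => pvInner grid m.toNat i j a) a := by
  have hn4 : (n - 4).toNat = n.toNat - 4 := by have := H.hn; omega
  simp only [pvAouter]
  obtain ⟨hl1, hv1⟩ := pv_addrows grid m.toNat 3 (i + 1)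
    ((List.range m.toNat).map (fun _ => (0 : Int))) (by simp)
  apply pv_jfold n m grid H i (n.toNat - (i + 4)) (i + 4) _ a (le_refl _) (by omega) hl1
  intro k hk
  rw [hv1 k hk, pv_getD_map_range, if_pos hk,
    show i + 4 - (i + 1) = 3 from by omega]
  ring

lemma pv_A_eq (n m : Int) (grid : List (List Int)) (H : pvH n m grid) :
    solve n m grid = pvSpec n m grid := by
  unfold solve pvSpec
  exact PySem.List.foldl_congr_mem _ _ _ _
    (fun a i hi => pv_aouter n m grid H i (List.mem_range.mp hi) a)

-- ---- B side ----
def pvSRow (grid : List (List Int)) (M x : Nat) : List Int :=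
  (List.range (M + 1)).map (fun y => pvRect grid x y)

lemma pvRP_succ (grid : List (List Int)) (x c : Nat) :
    pvRP grid x (c + 1) = pvRP grid x c + pvG grid x c := by
  simp [pvRP, List.range_succ]

lemma pvRect_zero (grid : List (List Int)) (y : Nat) : pvRect grid 0 y = 0 := by simp [pvRect]

lemma pvRect_succ_row (grid : List (List Int)) (x y : Nat) :
    pvRect grid (x + 1) y = pvRect grid x y + pvRP grid x y := by
  simp [pvRect, List.range_succ]

lemma pvRect_zero_col (grid : List (List Int)) (x : Nat) : pvRect grid x 0 = 0 := by
  simp [pvRect, pvRP]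

lemma pvRect_succ_col (grid : List (List Int)) (x c : Nat) :
    pvRect grid x (c + 1) = pvRect grid x c + pvCP grid c x := by
  unfold pvRect pvCP
  rw [← PySem.List.sum_map_add_int]
  congr 1
  apply List.map_congr_left
  intro a _
  exact pvRP_succ grid a c

lemma pvCP_split (grid : List (List Int)) (c a b : Nat) (hab : a ≤ b) :
    pvCP grid c b = pvCP grid c a + pvCS grid c a (b - a) := by
  unfold pvCP pvCS
  have hr : List.range b = List.range a ++ List.range' a (b - a) := by
    rw [List.range_eq_range', List.range_eq_range']
    rw [show List.range' a (b - a) = List.range' (0 + 1 * a) (b - a) from by simp,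
      List.range'_append, show a + (b - a) = b from by omega]
  rw [hr, List.map_append, List.sum_append]

lemma pv_brow (grid : List (List Int)) (M x : Nat) :
    pvBrow grid M (pvSRow grid M x) x = pvSRow grid M (x + 1) := by
  simp only [pvBrow]
  have hin : ∀ t : Nat, ((List.range t).foldl (fun (q : Int × List Int) y =>
      ((q.1 + (grid.getD x []).getD y 0),
       q.2 ++ [(pvSRow grid M x).getD (y + 1) 0 + (q.1 + (grid.getD x []).getD y 0)]))
      ((0 : Int), ([] : List Int)))
      = (pvRP grid x t,
         (List.range t).map (fun y => (pvSRow grid M x).getD (y + 1) 0 + pvRP grid x (y + 1))) := by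
    intro t
    induction t with
    | zero => simp [pvRP]
    | succ t ih =>
      rw [List.range_succ, List.foldl_append, List.foldl_cons, List.foldl_nil, ih]
      simp only [Prod.mk.injEq]
      constructor
      · rw [pvRP_succ]
        rfl
      · rw [List.map_append]
        simp only [List.map_cons, List.map_nil]
        rw [pvRP_succ]
        rfl
  rw [hin M]
  simp only []
  have hsrow : pvSRow grid M (x + 1)
      = pvRect grid (x + 1) 0 :: (List.range M).map (fun y => pvRect grid (x + 1) (y + 1)) := by
    unfold pvSRow
    rw [List.range_succ_eq_map, List.map_cons, List.map_map]
    rfl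
  rw [hsrow, pvRect_zero_col]
  congr 1
  apply List.map_congr_left
  intro y hy
  rw [List.mem_range] at hy
  unfold pvSRow
  rw [pv_getD_map_range, if_pos (by omega), pvRect_succ_row]

lemma pv_bs (grid : List (List Int)) (N M : Nat) :
    pvBS grid N M = (List.range (N + 1)).map (pvSRow grid M) := by
  simp only [pvBS]
  have hz : (List.range (M + 1)).map (fun _ => (0 : Int)) = pvSRow grid M 0 := by
    unfold pvSRow
    apply List.map_congr_left
    intro y _
    rw [pvRect_zero]
  rw [hz]
  have hmain : ∀ t, ((List.range t).foldl (fun (p : List Int × List (List Int)) x =>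
      (pvBrow grid M p.1 x, p.2 ++ [pvBrow grid M p.1 x])) (pvSRow grid M 0, [pvSRow grid M 0]))
      = (pvSRow grid M t, (List.range (t + 1)).map (pvSRow grid M)) := by
    intro t
    induction t with
    | zero => simp
    | succ t ih =>
      rw [List.range_succ, List.foldl_append, List.foldl_cons, List.foldl_nil, ih]
      simp only [Prod.mk.injEq]
      refine ⟨pv_brow grid M t, ?_⟩
      rw [pv_brow grid M t, List.range_succ (n := t + 1), List.map_append]
      simp
  rw [hmain N]

lemma pv_sd (grid : List (List Int)) (N M x y : Nat) (hx : x ≤ N) (hy : y ≤ M) :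
    pvG (pvBS grid N M) x y = pvRect grid x y := by
  rw [pv_bs]
  unfold pvG
  rw [pv_getD_map_range (pvSRow grid M) ([] : List Int), if_pos (by omega)]
  unfold pvSRow
  rw [pv_getD_map_range, if_pos (by omega)]

lemma pv_bpair (n m : Int) (grid : List (List Int)) (hn : 5 ≤ n) (hm : 4 ≤ m) (i j : Nat)
    (hij : i + 4 ≤ j) (hj : j < n.toNat) (a : Int) :
    pvBpair n m (pvBS grid n.toNat m.toNat) i a j = pvInner grid m.toNat i j a := by
  have hm4 : 4 ≤ m.toNat := by omega
  have hij1 : i + 1 ≤ j := by omega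
  simp only [pvBpair]
  set M := m.toNat with hM
  set N := n.toNat with hN
  set d : Int := (j : Int) - ↑i - 1 with hd
  -- the inline column function equals the interior column sum
  have hcol : ∀ c, c < M →
      pvG (pvBS grid N M) j (c + 1) - pvG (pvBS grid N M) j c
        - pvG (pvBS grid N M) (i + 1) (c + 1) + pvG (pvBS grid N M) (i + 1) c
      = pvCS grid c (i + 1) (j - (i + 1)) := by
    intro c hc
    rw [pv_sd grid N M j (c + 1) (by omega) (by omega),
      pv_sd grid N M j c (by omega) (by omega),
      pv_sd grid N M (i + 1) (c + 1) (by omega) (by omega),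
      pv_sd grid N M (i + 1) c (by omega) (by omega),
      pvRect_succ_col, pvRect_succ_col,
      pvCP_split grid c (i + 1) j hij1]
    ring
  -- the inline T function equals the prefix cost plus the constant column-0 shift
  have hmid : ∀ c, pvRect grid j c - pvRect grid (i + 1) c
      = ((List.range c).map (fun t => pvCS grid t (i + 1) (j - (i + 1)))).sum := by
    intro c
    induction c with
    | zero => simp [pvRect_zero_col]
    | succ c ihc =>
      rw [pvRect_succ_col, pvRect_succ_col, List.range_succ, List.map_append, List.sum_append,
        ← ihc, pvCP_split grid c (i + 1) j hij1]
      simp only [List.map_cons, List.map_nil, List.sum_cons, List.sum_nil]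
      ring
  have hTP : ∀ c, 1 ≤ c → c ≤ M - 1 →
      ((List.range c).map (fun t => pvCS grid t (i + 1) (j - (i + 1)))).sum + 2 * (c : Int)
        - pvRP grid i c - pvRP grid j c
      = pvP grid M i j (c - 1) + (2 - pvG grid i 0 - pvG grid j 0) := by
    intro c hc1 hc2
    induction c with
    | zero => omega
    | succ c ihc =>
      cases Nat.eq_or_lt_of_le hc1 with
      | inl h1 =>
        have hc0 : c = 0 := by omega
        subst hc0
        unfold pvP pvC2 pvRP
        simp [List.range_one, List.range_succ]
        try ring
      | inr h1 =>
        have hcc : 1 ≤ c := by omega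
        have ihc' := ihc hcc (by omega)
        rw [List.range_succ, List.map_append, List.sum_append, pvRP_succ, pvRP_succ]
        have hPstep : pvP grid M i j (c + 1 - 1) = pvP grid M i j (c - 1) + pvC2 grid M i j c := by
          unfold pvP
          rw [show c + 1 - 1 + 1 = (c - 1 + 1) + 1 from by omega, List.range_succ,
            List.map_append, List.sum_append, show c - 1 + 1 = c from by omega]
          try simp
        rw [hPstep]
        have hC2c : pvC2 grid M i j c = pvCS grid c (i + 1) (j - (i + 1))
            + (2 - pvG grid i c - pvG grid j c) := by
          unfold pvC2
          rw [if_pos (by omega)]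
        rw [hC2c]
        push_cast
        simp only [List.map_cons, List.map_nil, List.sum_cons, List.sum_nil]
        linarith [ihc']
  have hT : ∀ c, 1 ≤ c → c ≤ M - 1 →
      (pvG (pvBS grid N M) j c - pvG (pvBS grid N M) (i + 1) c) + 2 * (c : Int)
        - (pvG (pvBS grid N M) (i + 1) c - pvG (pvBS grid N M) i c)
        - (pvG (pvBS grid N M) (j + 1) c - pvG (pvBS grid N M) j c)
      = pvP grid M i j (c - 1) + (2 - pvG grid i 0 - pvG grid j 0) := by
    intro c hc1 hc2
    rw [pv_sd grid N M j c (by omega) (by omega),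
      pv_sd grid N M (i + 1) c (by omega) (by omega),
      pv_sd grid N M i c (by omega) (by omega),
      pv_sd grid N M (j + 1) c (by omega) (by omega)]
    have hri : pvRect grid (i + 1) c - pvRect grid i c = pvRP grid i c := by
      rw [pvRect_succ_row]; ring
    have hrj : pvRect grid (j + 1) c - pvRect grid j c = pvRP grid j c := by
      rw [pvRect_succ_row]; ring
    have := hTP c hc1 hc2
    rw [← hmid c] at this
    linarith [this, hri, hrj]
  rw [pv_ascfold_eq_min
    (fun r => ((pvG (pvBS grid N M) j r - pvG (pvBS grid N M) (i + 1) r) + 2 * (r : Int)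
        - (pvG (pvBS grid N M) (i + 1) r - pvG (pvBS grid N M) i r)
        - (pvG (pvBS grid N M) (j + 1) r - pvG (pvBS grid N M) j r))
      + (d - (pvG (pvBS grid N M) j (r + 1) - pvG (pvBS grid N M) j r
        - pvG (pvBS grid N M) (i + 1) (r + 1) + pvG (pvBS grid N M) (i + 1) r)))
    (fun l => (d - (pvG (pvBS grid N M) j (l + 1) - pvG (pvBS grid N M) j l
        - pvG (pvBS grid N M) (i + 1) (l + 1) + pvG (pvBS grid N M) (i + 1) l))
      - ((pvG (pvBS grid N M) j (l + 1) - pvG (pvBS grid N M) (i + 1) (l + 1)) + 2 * ((l + 1 : Nat) : Int)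
        - (pvG (pvBS grid N M) (i + 1) (l + 1) - pvG (pvBS grid N M) i (l + 1))
        - (pvG (pvBS grid N M) (j + 1) (l + 1) - pvG (pvBS grid N M) j (l + 1))))
    (M - 3) a]
  unfold pvInner pvCosts
  congr 1
  apply pv_flatMap_congr
  intro r hr
  rw [List.mem_range'_1] at hr
  apply List.map_congr_left
  intro l hl
  rw [List.mem_range] at hl
  have hcolr := hcol r (by omega)
  have hcoll := hcol l (by omega)
  have hTr := hT r (by omega) (by omega)
  have hTl := hT (l + 1) (by omega) (by omega)
  rw [show l + 1 - 1 = l from by omega] at hTl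
  unfold pvF pvGl
  rw [← hd]
  linarith [hcolr, hcoll, hTr, hTl]

lemma pv_B_eq (n m : Int) (grid : List (List Int)) (hn : 5 ≤ n) (hm : 4 ≤ m) :
    solve_alt n m grid = pvSpec n m grid := by
  simp only [solve_alt]
  rw [if_neg (by omega)]
  unfold pvSpec
  rw [show n.toNat - 4 = (n - 4).toNat from by omega]
  apply PySem.List.foldl_congr_mem
  intro a i hi
  rw [List.mem_range] at hi
  apply PySem.List.foldl_congr_mem
  intro a' j hj
  rw [List.mem_range'_1] at hj
  exact pv_bpair n m grid hn hm i j (by omega) (by omega) a'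

-- ---- degenerate sizes ----
lemma pv_A_small (n m : Int) (grid : List (List Int)) (h : n < 5 ∨ m < 4) :
    solve n m grid = n * m := by
  by_cases h5 : n < 5
  · unfold solve
    rw [show (n - 4).toNat = 0 from by omega]
    simp
  · have hm3 : m.toNat - 3 = 0 := by omega
    have hsnd : ∀ (L : List Nat) (i : Nat) (cnt : List Int) (a : Int),
        ((L.foldl (pvAstep n m grid i) (cnt, a))).2 = a := by
      intro L
      induction L with
      | nil => intros; rfl
      | cons x t ihL =>
        intro i cnt a
        rw [List.foldl_cons]
        have hstep : pvAstep n m grid i (cnt, a) x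
            = ((List.range m.toNat).map (fun k => cnt.getD k 0 + pvG grid x k), a) := by
          simp [pvAstep, hm3]
        rw [hstep]
        exact ihL i _ a
    have hout : ∀ (a : Int) (i : Nat), pvAouter n m grid a i = a := by
      intro a i
      simp only [pvAouter]
      exact hsnd _ _ _ _
    unfold solve
    rw [PySem.List.foldl_congr_mem (List.range ((n - 4).toNat)) (pvAouter n m grid)
      (fun a _ => a) (n * m) (fun acc x _ => hout acc x)]
    exact PySem.List.foldl_ignore _ _

-- ===== VERDICT (by name: the statement is the Claim_ definition above) =====
theorem solve_spec : Claim_equal_solve := by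
  unfold Claim_equal_solve
  intro n m grid _hdom hpre
  unfold Spec_solve
  by_cases h : n < 5 ∨ m < 4
  · rw [pv_A_small n m grid h]
    simp only [solve_alt, if_pos h]
  · push_neg at h
    obtain ⟨hn, hm⟩ := h
    obtain ⟨_, _, h01⟩ := hpre (by omega) (by omega)
    have h01' : ∀ x, x < n.toNat → ∀ c, c < m.toNat → pvG grid x c = 0 ∨ pvG grid x c = 1 := by
      intro x hx c hc
      unfold pvG
      by_cases hxg : x < grid.length
      · have hrow : grid.getD x [] = grid[x]'hxg := by
          rw [List.getD_eq_getElem?_getD, List.getElem?_eq_getElem hxg]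
          rfl
        rw [hrow]
        have hx' : x < (grid.take n.toNat).length := by
          rw [List.length_take]
          omega
        have heq : (grid.take n.toNat)[x]'hx' = grid[x]'hxg := List.getElem_take
        have hmem : grid[x]'hxg ∈ grid.take n.toNat := heq ▸ List.getElem_mem hx'
        by_cases hcg : c < (grid[x]'hxg).length
        · have hval : (grid[x]'hxg).getD c 0 = (grid[x]'hxg)[c]'hcg := by
            rw [List.getD_eq_getElem?_getD, List.getElem?_eq_getElem hcg]
            rfl
          rw [hval]
          have hc' : c < ((grid[x]'hxg).take m.toNat).length := by
            rw [List.length_take]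
            omega
          have heq2 : ((grid[x]'hxg).take m.toNat)[c]'hc' = (grid[x]'hxg)[c]'hcg :=
            List.getElem_take
          have hmem2 : (grid[x]'hxg)[c]'hcg ∈ (grid[x]'hxg).take m.toNat :=
            heq2 ▸ List.getElem_mem hc'
          exact h01 hm _ hmem _ hmem2
        · rw [List.getD_eq_getElem?_getD, List.getElem?_eq_none (by omega)]
          simp
      · rw [show grid.getD x [] = [] from by
          rw [List.getD_eq_getElem?_getD, List.getElem?_eq_none (by omega)]
          rfl]
        simp
    rw [pv_A_eq n m grid ⟨hn, hm, h01'⟩, pv_B_eq n m grid hn hm]
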